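-- pv_equiv track=rewrite | github.com/zhroot/leetcode | haha.py | short_array
-- ===== SOURCE A (Python) =====
-- def short_array(arr):
--     new_arr = []
--     n = 0
--     for i in range(0,len(arr)):
--         if i != 0 and i % 5 == 0:
--             new_arr.append(n)
--             n = 0
--         shift = (i % 5) * 12
--         n += (arr[i] << shift)
--     if n != 0:
--         new_arr.append(n)
--     return new_arr
-- ===== SOURCE B (Python) =====
-- def short_array(arr):
--     result = []
--     for start in range(0, len(arr), 5):
--         group = arr[start:start + 5]
--         result.append(sum(v << (k * 12) for k, v in enumerate(group)))
--     if result and result[-1] == 0: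
--         result.pop()
--     return result
-- ===== Notes on version B (the rewrite author's own statement) =====
-- stated objective: simpler
-- what changed: B iterates over fixed-size chunks (slices of 5) and packs each slice with a single enumerate-sum, instead of A's flat index loop that threads a mod-5 shift accumulator and flushes it at group boundaries; like A, a trailing packed value of 0 is omitted.
import Mathlib
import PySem

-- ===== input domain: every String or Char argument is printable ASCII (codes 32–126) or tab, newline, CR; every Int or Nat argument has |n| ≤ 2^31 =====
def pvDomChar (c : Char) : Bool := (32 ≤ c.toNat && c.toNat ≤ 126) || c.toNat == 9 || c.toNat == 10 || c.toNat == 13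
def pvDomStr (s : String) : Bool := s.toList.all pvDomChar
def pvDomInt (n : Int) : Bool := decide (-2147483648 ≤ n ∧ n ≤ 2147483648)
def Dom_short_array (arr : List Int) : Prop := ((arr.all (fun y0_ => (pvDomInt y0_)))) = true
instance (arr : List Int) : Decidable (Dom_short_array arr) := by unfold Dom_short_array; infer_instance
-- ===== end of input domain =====

-- B packs the array chunk-by-chunk (slices of 5 summed via enumerate) instead of A's flat
-- index loop threading a mod-5 accumulator with boundary flushes; same value, chosen for simplicity.

-- ===== PORT A =====
def short_array (arr : List Int) : List Int :=
  let r := (PySem.List.pyRange 0 arr.length 1).foldl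
    (fun (st : List Int × Int) i =>
      let st := if i ≠ 0 ∧ PySem.Int.mod i 5 = 0 then (st.1 ++ [st.2], (0 : Int)) else st
      let shift := PySem.Int.mod i 5 * 12
      (st.1, st.2 + (PySem.List.pyGetD arr i 0) <<< shift.toNat)) ([], 0)
  if r.2 ≠ 0 then r.1 ++ [r.2] else r.1

-- ===== PORT B =====
def short_array_alt (arr : List Int) : List Int :=
  let result := (PySem.List.pyRange 0 arr.length 5).foldl
    (fun acc start =>
      acc ++ [((PySem.List.enumerate (PySem.List.slice arr (some start) (some (start + 5))) 0).map
        (fun kv => kv.2 <<< (kv.1 * 12).toNat)).sum]) []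
  if result.getLast? = some 0 then result.dropLast else result

-- ===== PRECONDITION & SPEC =====
def Spec_short_array (arr : List Int) (out : List Int) : Prop := out = short_array_alt arr
instance (arr : List Int) (out : List Int) : Decidable (Spec_short_array arr out) := by unfold Spec_short_array; infer_instance

-- ===== CLAIM (what is proved, stated in full; the proofs are below) =====
def Claim_equal_short_array : Prop := ∀ (arr : List Int), Dom_short_array arr → Spec_short_array arr (short_array arr)

-- ===== LEMMAS AND PROOFS =====

-- the shift applied to the k-th element of a chunk
def pvSh (kv : Int × Int) : Int := kv.2 <<< (kv.1 * 12).toNat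

-- packed value of one chunk (what B's inner sum computes)
def pvPack (g : List Int) : Int := ((PySem.List.enumerate g 0).map pvSh).sum

-- the list of packed values of the 5-chunks
def pvChunks (l : List Int) : List Int :=
  if l = [] then [] else pvPack (l.take 5) :: pvChunks (l.drop 5)
  termination_by l.length
  decreasing_by
    cases l with
    | nil => simp_all
    | cons x t => simp

-- drop the last element iff it is 0
def pvDz : List Int → List Int
  | [] => []
  | [x] => if x = 0 then [] else [x]
  | x :: y :: t => x :: pvDz (y :: t)

-- A's loop body, over (index, value) pairs
def pvF (st : List Int × Int) (p : Int × Int) : List Int × Int :=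
  let st := if p.1 ≠ 0 ∧ PySem.Int.mod p.1 5 = 0 then (st.1 ++ [st.2], (0 : Int)) else st
  (st.1, st.2 + p.2 <<< (PySem.Int.mod p.1 5 * 12).toNat)

-- A's final step
def pvFinish (st : List Int × Int) : List Int := if st.2 ≠ 0 then st.1 ++ [st.2] else st.1

lemma pvChunks_cons_ne_nil (x : Int) (t : List Int) : pvChunks (x :: t) ≠ [] := by
  rw [pvChunks]; simp

lemma pvDz_cons_of_ne_nil (n : Int) (l : List Int) (h : l ≠ []) :
    pvDz (n :: l) = n :: pvDz l := by
  cases l with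
  | nil => exact absurd rfl h
  | cons y t => rfl

lemma pvDz_eq_dropLast (cs : List Int) :
    (if cs.getLast? = some 0 then cs.dropLast else cs) = pvDz cs := by
  induction cs with
  | nil => rfl
  | cons x t ih =>
    cases t with
    | nil =>
      by_cases h : x = 0 <;> simp [pvDz, h]
    | cons y r =>
      rw [pvDz_cons_of_ne_nil x (y :: r) (by simp), ← ih]
      by_cases h : (y :: r).getLast? = some 0
      · simp [List.getLast?_cons_cons, h]
      · simp [List.getLast?_cons_cons, h]

lemma pvEnum_append (xs ys : List Int) (s : Int) :
    PySem.List.enumerate (xs ++ ys) s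
      = PySem.List.enumerate xs s ++ PySem.List.enumerate ys (s + xs.length) := by
  induction xs generalizing s with
  | nil => simp [PySem.List.enumerate_nil]
  | cons x t ih =>
    simp [PySem.List.enumerate_cons, ih]
    ring_nf

lemma pvMod5 (m j : Nat) (hj : j < 5) :
    PySem.Int.mod (5 * (m : Int) + (j : Int)) 5 = (j : Int) := by
  rw [PySem.Int.mod_eq_emod_of_pos (by norm_num : (0:Int) < 5)]
  omega

-- folding pvF across the tail positions j.. of a chunk just accumulates shifted values
lemma pvTail (g : List Int) : ∀ (m j : Nat) (acc : List Int) (n : Int),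
    1 ≤ j → j + g.length ≤ 5 →
    (PySem.List.enumerate g (5 * (m : Int) + (j : Int))).foldl pvF (acc, n)
      = (acc, n + ((PySem.List.enumerate g (j : Int)).map pvSh).sum) := by
  induction g with
  | nil => intro m j acc n _ _; simp [PySem.List.enumerate_nil]
  | cons x t ih =>
    intro m j acc n hj hlen
    rw [PySem.List.enumerate_cons, PySem.List.enumerate_cons]
    simp only [List.foldl_cons]
    have hlen' : j < 5 := by simp at hlen; omega
    have hcond : ¬((5 * (m : Int) + (j : Int)) ≠ 0 ∧
        PySem.Int.mod (5 * (m : Int) + (j : Int)) 5 = 0) := by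
      rw [pvMod5 m j hlen']
      push Not
      intro _
      omega
    have hstep : pvF (acc, n) (5 * (m : Int) + (j : Int), x)
        = (acc, n + x <<< (((j : Int)) * 12).toNat) := by
      simp only [pvF, if_neg hcond]
      rw [pvMod5 m j hlen']
    rw [hstep]
    have hj1 : (5 * (m : Int) + (j : Int)) + 1 = 5 * (m : Int) + ((j + 1 : Nat) : Int) := by
      push_cast; ring
    rw [hj1, ih m (j + 1) acc _ (by omega) (by simp at hlen ⊢; omega)]
    simp only [List.map_cons, List.sum_cons, pvSh]
    have hj2 : ((j : Int)) + 1 = ((j + 1 : Nat) : Int) := by push_cast; ring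
    rw [hj2]
    ring_nf

lemma pvPack_cons (x : Int) (g : List Int) :
    pvPack (x :: g) = x + ((PySem.List.enumerate g 1).map pvSh).sum := by
  simp [pvPack, PySem.List.enumerate_cons, pvSh]

-- core invariant: once the element at index 5*m is absorbed as x, finishing the loop over the
-- rest t yields acc ++ pvDz (pvChunks (x :: t))
lemma pvChunkStep (t : List Int) (m : Nat) (acc : List Int) (x : Int) :
    pvFinish ((PySem.List.enumerate t (5 * (m : Int) + 1)).foldl pvF (acc, x))
      = acc ++ pvDz (pvChunks (x :: t)) := by
  have hsplit : t.take 4 ++ t.drop 4 = t := List.take_append_drop 4 t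
  have hg4 : (t.take 4).length ≤ 4 := by simp
  conv_lhs => rw [← hsplit]
  rw [pvEnum_append,  List.foldl_append]
  rw [show (5 * (m : Int) + 1) = 5 * (m : Int) + ((1 : Nat) : Int) by norm_num]
  rw [pvTail (t.take 4) m 1 acc x (by omega) (by omega)]
  rw [show ((1 : Nat) : Int) = (1 : Int) by norm_num]
  rw [← pvPack_cons x (t.take 4)]
  cases hr : t.drop 4 with
  | nil =>
    have hle : t.length ≤ 4 := by
      by_contra hc
      have hh := congrArg List.length hr
      simp at hh
      omega
    have hgt : t.take 4 = t := List.take_of_length_le hle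
    rw [hgt]
    have hchunks : pvChunks (x :: t) = [pvPack (x :: t)] := by
      rw [pvChunks]
      rw [if_neg (by simp : ¬ (x :: t) = [])]
      rw [List.take_of_length_le (by simp; omega), List.drop_eq_nil_of_le (by simp; omega)]
      rw [pvChunks]
      simp
    rw [hchunks]
    simp only [PySem.List.enumerate_nil, List.foldl_nil, pvFinish, pvDz]
    by_cases h : pvPack (x :: t) = 0 <;> simp [h]
  | cons y r' =>
    have htlen : 5 ≤ t.length := by
      by_contra hc
      have : t.drop 4 = [] := List.drop_eq_nil_of_le (by omega)
      rw [hr] at this; simp at this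
    have hg : ((t.take 4).length : Int) = 4 := by simp; omega
    rw [hg]
    rw [PySem.List.enumerate_cons, List.foldl_cons]
    have hidx : (5 * (m : Int) + 1 + (4 : Int)) = 5 * ((m + 1 : Nat) : Int) + ((0 : Nat) : Int) := by
      push_cast; ring
    have hmod0 : PySem.Int.mod (5 * (m : Int) + 1 + (4 : Int)) 5 = 0 := by
      rw [hidx, pvMod5 (m + 1) 0 (by omega)]
      norm_num
    have hstep : pvF (acc, pvPack (x :: t.take 4)) (5 * (m : Int) + 1 + (4 : Int), y)
        = (acc ++ [pvPack (x :: t.take 4)], y) := by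
      simp only [pvF]
      rw [if_pos ⟨by omega, hmod0⟩, hmod0]
      norm_num
    rw [hstep]
    have hidx2 : (5 * (m : Int) + 1 + (4 : Int)) + 1 = 5 * ((m + 1 : Nat) : Int) + 1 := by
      push_cast; ring
    rw [hidx2]
    rw [pvChunkStep r' (m + 1) (acc ++ [pvPack (x :: t.take 4)]) y]
    have hchunks : pvChunks (x :: t) = pvPack (x :: t.take 4) :: pvChunks (y :: r') := by
      rw [pvChunks]
      rw [if_neg (by simp : ¬ (x :: t) = [])]
      simp [hr]
    rw [hchunks, pvDz_cons_of_ne_nil _ _ (pvChunks_cons_ne_nil y r')]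
    simp
  termination_by t.length
  decreasing_by
    have hh := congrArg List.length hr
    simp at hh
    omega

-- A's index loop over range(len(arr)) is the pvF loop over enumerate(arr)
lemma pvRangeEnum (arr : List Int) (s : Nat) (st : List Int × Int) :
    (PySem.List.pyRange (s : Int) (arr.length : Int) 1).foldl
      (fun (st : List Int × Int) i => pvF st (i, PySem.List.pyGetD arr i 0)) st
      = (PySem.List.enumerate (arr.drop s) (s : Int)).foldl pvF st := by
  by_cases h : s < arr.length
  · rw [PySem.List.pyRange_one_cons (by exact_mod_cast h)]
    rw [← List.getElem_cons_drop (as := arr) (i := s) h, PySem.List.enumerate_cons]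
    simp only [List.foldl_cons]
    have hget : PySem.List.pyGetD arr ((s : Nat) : Int) 0 = arr[s] := by
      rw [PySem.List.pyGetD_natCast, List.getD_eq_getElem arr 0 h]
    rw [hget]
    have hcast : ((s : Nat) : Int) + 1 = (((s + 1 : Nat)) : Int) := by push_cast; ring
    rw [hcast]
    exact pvRangeEnum arr (s + 1) _
  · rw [PySem.List.pyRange_one_eq_nil (by exact_mod_cast Nat.le_of_not_lt h),
        List.drop_eq_nil_of_le (by omega), PySem.List.enumerate_nil]
    simp
  termination_by arr.length - s
  decreasing_by omega

lemma pvA_eq (arr : List Int) : short_array arr = pvDz (pvChunks arr) := by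
  have hA : short_array arr = pvFinish ((PySem.List.pyRange 0 (arr.length : Int) 1).foldl
      (fun (st : List Int × Int) i => pvF st (i, PySem.List.pyGetD arr i 0)) ([], 0)) := rfl
  rw [hA]
  have h0 := pvRangeEnum arr 0 ([], 0)
  rw [show ((0 : Nat) : Int) = (0 : Int) by norm_num] at h0
  rw [h0, List.drop_zero]
  cases arr with
  | nil =>
    rw [PySem.List.enumerate_nil]
    rw [pvChunks]
    simp [pvFinish, pvDz]
  | cons x t =>
    rw [PySem.List.enumerate_cons, List.foldl_cons]
    have hstep : pvF ([], 0) (0, x) = ([], x) := by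
      simp only [pvF]
      rw [if_neg (by simp), show PySem.Int.mod 0 5 = 0 by decide]
      simp
    rw [hstep]
    rw [show (0 : Int) + 1 = 5 * ((0 : Nat) : Int) + 1 by norm_num]
    rw [pvChunkStep t 0 [] x]
    simp

lemma pvRange5_nil (a b : Int) (h : b ≤ a) : PySem.List.pyRange a b 5 = [] := by
  rw [PySem.List.pyRange_of_pos a b (by norm_num)]
  simp [show ¬ a < b by omega]

lemma pvRange5_cons (a b : Int) (h : a < b) :
    PySem.List.pyRange a b 5 = a :: PySem.List.pyRange (a + 5) b 5 := by
  rw [PySem.List.pyRange_of_pos a b (by norm_num),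
      PySem.List.pyRange_of_pos (a + 5) b (by norm_num)]
  rw [if_pos h]
  by_cases h2 : a + 5 < b
  · rw [if_pos h2]
    have hN : ((b - a + 5 - 1) / 5).toNat = ((b - (a + 5) + 5 - 1) / 5).toNat + 1 := by omega
    rw [hN, List.range_succ_eq_map, List.map_cons, List.map_map]
    congr 1
    · norm_num
    · apply List.map_congr_left
      intro k _
      simp only [Function.comp_apply]
      push_cast
      ring
  · rw [if_neg h2]
    have hN : ((b - a + 5 - 1) / 5).toNat = 1 := by omega
    rw [hN]
    simp

lemma pvB_chunks (arr : List Int) (s : Nat) :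
    (PySem.List.pyRange (s : Int) (arr.length : Int) 5).map
      (fun start => ((PySem.List.enumerate (PySem.List.slice arr (some start) (some (start + 5))) 0).map
        (fun kv => kv.2 <<< (kv.1 * 12).toNat)).sum)
      = pvChunks (arr.drop s) := by
  by_cases h : s < arr.length
  · rw [pvRange5_cons _ _ (by exact_mod_cast h), List.map_cons]
    have hslice : PySem.List.slice arr (some ((s : Nat) : Int)) (some (((s : Nat) : Int) + 5))
        = (arr.drop s).take 5 := by
      rw [show ((s : Nat) : Int) + 5 = ((s : Nat) : Int) + ((5 : Nat) : Int) by push_cast; ring]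
      exact PySem.List.slice_natCast_add arr s 5
    rw [hslice]
    rw [show ((s : Nat) : Int) + 5 = ((s + 5 : Nat) : Int) by push_cast; ring]
    rw [pvB_chunks arr (s + 5)]
    have hne : ¬ List.drop s arr = [] := by
      simp only [List.drop_eq_nil_iff]
      omega
    conv_rhs => rw [pvChunks]
    rw [if_neg hne, List.drop_drop]
    rfl
  · rw [pvRange5_nil _ _ (by exact_mod_cast Nat.le_of_not_lt h),
        List.drop_eq_nil_of_le (by omega)]
    rw [pvChunks]
    simp
  termination_by arr.length - s
  decreasing_by omega

lemma pvB_eq (arr : List Int) : short_array_alt arr = pvDz (pvChunks arr) := by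
  have hB : short_array_alt arr =
      (let result := (PySem.List.pyRange 0 (arr.length : Int) 5).foldl
        (fun acc start =>
          acc ++ [((PySem.List.enumerate (PySem.List.slice arr (some start) (some (start + 5))) 0).map
            (fun kv => kv.2 <<< (kv.1 * 12).toNat)).sum]) []
      if result.getLast? = some 0 then result.dropLast else result) := rfl
  rw [hB]
  simp only []
  rw [PySem.List.foldl_append_singleton_eq_map
    (fun start => ((PySem.List.enumerate (PySem.List.slice arr (some start) (some (start + 5))) 0).map
      (fun kv => kv.2 <<< (kv.1 * 12).toNat)).sum)]
  rw [List.nil_append]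
  have h0 := pvB_chunks arr 0
  rw [show ((0 : Nat) : Int) = (0 : Int) by norm_num, List.drop_zero] at h0
  rw [h0, pvDz_eq_dropLast]

-- ===== VERDICT (by name: the statement is the Claim_ definition above) =====
theorem short_array_spec : Claim_equal_short_array := by
  intro arr _
  unfold Spec_short_array
  rw [pvA_eq, pvB_eq]
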